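-- pv_equiv track=rewrite | github.com/nickprock/medha | experiments/latency_benchmark.py | generate_unrelated
-- ===== SOURCE A (Python) =====
-- _UNRELATED_QUESTIONS = [
--     "What is the speed of light?",
--     "Who painted the Mona Lisa?",
--     "How do I make pasta carbonara?",
--     "What year did the Berlin Wall fall?",
--     "Explain quantum entanglement",
--     "What is the capital of Mongolia?",
--     "How tall is Mount Everest?",
--     "Who wrote Crime and Punishment?",
--     "What causes the northern lights?",
--     "How many moons does Jupiter have?",
--     "What is the boiling point of mercury?",
--     "Who invented the telephone?",
--     "What is photosynthesis?",
--     "How does a combustion engine work?",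
--     "What are the symptoms of altitude sickness?",
--     "Who was the first person in space?",
--     "What is the Fibonacci sequence?",
--     "How do birds navigate during migration?",
--     "What is the deepest point in the ocean?",
--     "Who discovered penicillin?",
-- ]
--
-- def generate_unrelated(count: int) -> list[str]:
--     """Generate questions unrelated to any stored dataset entry.
--
--     These should produce cache misses (no match) at every tier.
--     """
--     questions = []
--     for i in range(count):
--         base = _UNRELATED_QUESTIONS[i % len(_UNRELATED_QUESTIONS)]
--         if i >= len(_UNRELATED_QUESTIONS):
--             # Add a numeric suffix to ensure uniqueness beyond the pool size
--             base = f"{base} (variant {i})"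
--         questions.append(base)
--     return questions
-- ===== SOURCE B (Python) =====
-- _UNRELATED_QUESTIONS = [
--     "What is the speed of light?",
--     "Who painted the Mona Lisa?",
--     "How do I make pasta carbonara?",
--     "What year did the Berlin Wall fall?",
--     "Explain quantum entanglement",
--     "What is the capital of Mongolia?",
--     "How tall is Mount Everest?",
--     "Who wrote Crime and Punishment?",
--     "What causes the northern lights?",
--     "How many moons does Jupiter have?",
--     "What is the boiling point of mercury?",
--     "Who invented the telephone?",
--     "What is photosynthesis?",
--     "How does a combustion engine work?",
--     "What are the symptoms of altitude sickness?",
--     "Who was the first person in space?",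
--     "What is the Fibonacci sequence?",
--     "How do birds navigate during migration?",
--     "What is the deepest point in the ocean?",
--     "Who discovered penicillin?",
-- ]
--
-- def generate_unrelated(count: int) -> list[str]:
--     """Generate questions unrelated to any stored dataset entry.
--
--     These should produce cache misses (no match) at every tier.
--     """
--     pool = _UNRELATED_QUESTIONS
--     n = len(pool)
--     prefix = pool[:max(0, min(count, n))]
--     variants = [f"{pool[i % n]} (variant {i})" for i in range(n, count)]
--     return prefix + variants
-- ===== Notes on version B (the rewrite author's own statement) =====
-- stated objective: simpler
-- what changed: Replaces A's single loop with a per-iteration modulo and suffix branch by a branch-free decomposition: a clamped slice of the question pool for the first min(count, 20) entries plus one comprehension over only the variant indices range(20, count).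
import Mathlib
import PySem

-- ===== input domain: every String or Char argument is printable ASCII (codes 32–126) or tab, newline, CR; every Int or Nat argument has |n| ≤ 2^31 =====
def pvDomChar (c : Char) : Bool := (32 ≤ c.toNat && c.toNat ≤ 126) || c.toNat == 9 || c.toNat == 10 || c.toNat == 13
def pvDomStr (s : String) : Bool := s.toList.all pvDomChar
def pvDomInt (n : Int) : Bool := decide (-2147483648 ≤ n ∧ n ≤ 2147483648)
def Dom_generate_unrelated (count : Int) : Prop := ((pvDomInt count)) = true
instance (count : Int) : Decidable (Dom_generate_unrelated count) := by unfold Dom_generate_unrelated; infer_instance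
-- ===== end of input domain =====

-- B replaces A's single modulo-and-branch loop by a slice of the pool prefix plus a
-- comprehension over the variant indices only (objective: simpler decomposition).

def pvPool : List String := [
  "What is the speed of light?",
  "Who painted the Mona Lisa?",
  "How do I make pasta carbonara?",
  "What year did the Berlin Wall fall?",
  "Explain quantum entanglement",
  "What is the capital of Mongolia?",
  "How tall is Mount Everest?",
  "Who wrote Crime and Punishment?",
  "What causes the northern lights?",
  "How many moons does Jupiter have?",
  "What is the boiling point of mercury?",
  "Who invented the telephone?",
  "What is photosynthesis?",
  "How does a combustion engine work?",
  "What are the symptoms of altitude sickness?",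
  "Who was the first person in space?",
  "What is the Fibonacci sequence?",
  "How do birds navigate during migration?",
  "What is the deepest point in the ocean?",
  "Who discovered penicillin?"]

-- ===== PORT A =====
-- loop body of A: i % len is always in range, so pyGetD is exact here (no IndexError possible)
def pvLineA (i : Int) : String :=
  let base := PySem.List.pyGetD pvPool (PySem.Int.mod i (pvPool.length : Int)) ""
  if (pvPool.length : Int) ≤ i then base ++ " (variant " ++ PySem.Int.toStr i ++ ")" else base

def generate_unrelated (count : Int) : List String :=
  (PySem.List.pyRange 0 count 1).foldl (fun questions i => questions ++ [pvLineA i]) []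

-- ===== PORT B =====
def generate_unrelated_alt (count : Int) : List String :=
  let n : Int := (pvPool.length : Int)
  let pre := PySem.List.slice pvPool none (some (max 0 (min count n)))
  let variants := (PySem.List.pyRange n count 1).map (fun i =>
    PySem.List.pyGetD pvPool (PySem.Int.mod i n) "" ++ " (variant " ++ PySem.Int.toStr i ++ ")")
  pre ++ variants

-- ===== PRECONDITION & SPEC =====
def Spec_generate_unrelated (count : Int) (out : List String) : Prop := out = generate_unrelated_alt count
instance (count : Int) (out : List String) : Decidable (Spec_generate_unrelated count out) := by unfold Spec_generate_unrelated; infer_instance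

-- ===== CLAIM (what is proved, stated in full; the proofs are below) =====
def Claim_equal_generate_unrelated : Prop := ∀ (count : Int), Dom_generate_unrelated count → Spec_generate_unrelated count (generate_unrelated count)

-- ===== LEMMAS AND PROOFS =====

theorem pv_foldl_snoc (g : Int → String) (l : List Int) (init : List String) :
    l.foldl (fun a i => a ++ [g i]) init = init ++ l.map g := by
  induction l generalizing init with
  | nil => simp
  | cons x xs ih => simp [List.foldl_cons, ih]

theorem pvA_eq_map (c : Int) :
    generate_unrelated c = (PySem.List.pyRange 0 c 1).map pvLineA := by
  unfold generate_unrelated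
  rw [pv_foldl_snoc]
  simp

theorem pv_prefix_small (k : Nat) (hk : k ≤ 20) :
    (List.range k).map (fun j : Nat => pvLineA (j : Int)) = pvPool.take k := by
  interval_cases k <;> decide

theorem generate_unrelated_spec : Claim_equal_generate_unrelated := by
  unfold Claim_equal_generate_unrelated
  intro c _
  unfold Spec_generate_unrelated generate_unrelated_alt
  rw [pvA_eq_map]
  show _ = PySem.List.slice pvPool none (some (max 0 (min c 20))) ++
      (PySem.List.pyRange 20 c 1).map _
  by_cases hc : c ≤ 20
  · -- no variants: both are the clamped pool prefix
    rw [PySem.List.pyRange_one_eq_nil hc, List.map_nil, List.append_nil]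
    have hm : max 0 (min c 20) = ((max 0 (min c 20)).toNat : Int) := by omega
    rw [hm, PySem.List.slice_to_natCast]
    have hcn : (PySem.List.pyRange 0 c 1) = (List.range (max 0 (min c 20)).toNat).map (fun k => ((k : Nat) : Int)) := by
      rw [PySem.List.pyRange_one]
      have : (c - 0).toNat = (max 0 (min c 20)).toNat := by omega
      rw [this]
      simp
    rw [hcn, List.map_map]
    exact pv_prefix_small (max 0 (min c 20)).toNat (by omega)
  · -- c > 20: split A's range at 20
    push Not at hc
    rw [PySem.List.pyRange_one_append 0 20 c (by omega) (by omega), List.map_append]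
    have h1 : (PySem.List.pyRange 0 20 1).map pvLineA = pvPool := by decide
    have h2 : max 0 (min c 20) = (20 : Int) := by omega
    have h3 : PySem.List.slice pvPool none (some (20 : Int)) = pvPool := by decide
    rw [h1, h2, h3]
    congr 1
    apply List.map_congr_left
    intro i hi
    have h20 : (20 : Int) ≤ i := ((PySem.List.mem_pyRange_one).1 hi).1
    simp [pvLineA, if_pos (show ((pvPool.length : Int)) ≤ i by simpa [pvPool] using h20)]
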